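-- pv_equiv track=rewrite | github.com/ValachPatrik/miniprojects-highschool-year2 | likes.py | f
-- ===== SOURCE A (Python) =====
-- def f(likes, size):
--     notliked = []
--     for i in range(size):
--         for j in likes:
--             if j[1] == i:
--                 break
--         else:
--             notliked.append(i)
--     return notliked
-- ===== SOURCE B (Python) =====
-- def f(likes, size):
--     # Gap-filling: sort the distinct in-range liked indices, then emit the
--     # ranges between consecutive liked values; no per-index membership test.
--     liked = sorted({p[1] for p in likes if 0 <= p[1] < size})
--     out = []
--     start = 0
--     for v in liked:
--         out.extend(range(start, v))
--         start = v + 1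
--     out.extend(range(start, size))
--     return out
-- ===== Notes on version B (the rewrite author's own statement) =====
-- stated objective: faster
-- what changed: Replaces A's per-index rescan of likes with a sort of the distinct in-range liked indices followed by gap-filling: the output is emitted as the ranges between consecutive liked values, so there is no per-candidate membership test at all.
import Mathlib
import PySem

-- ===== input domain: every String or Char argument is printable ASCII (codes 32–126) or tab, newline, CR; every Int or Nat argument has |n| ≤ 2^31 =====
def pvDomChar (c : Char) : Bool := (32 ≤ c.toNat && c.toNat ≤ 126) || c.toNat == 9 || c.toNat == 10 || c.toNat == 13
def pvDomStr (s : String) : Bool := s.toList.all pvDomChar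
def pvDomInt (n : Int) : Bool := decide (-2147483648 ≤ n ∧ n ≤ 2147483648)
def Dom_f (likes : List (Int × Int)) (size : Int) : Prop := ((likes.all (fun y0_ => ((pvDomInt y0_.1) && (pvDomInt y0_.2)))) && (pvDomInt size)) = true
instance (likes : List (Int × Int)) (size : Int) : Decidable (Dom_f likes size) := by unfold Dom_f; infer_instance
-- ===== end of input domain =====

-- B sorts the distinct in-range liked indices and emits the gaps between consecutive liked
-- values, replacing A's per-index rescan of likes (faster: no per-candidate membership test).

-- ===== PORT A =====
-- inner 'for j in likes: if j[1] == i: break / else: append' — true iff some pair's second equals i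
def scanLikes (likes : List (Int × Int)) (i : Int) : Bool :=
  match likes with
  | [] => false
  | j :: rest => if j.2 == i then true else scanLikes rest i

def f (likes : List (Int × Int)) (size : Int) : List Int :=
  (PySem.List.pyRange 0 size 1).foldl
    (fun notliked i => if scanLikes likes i then notliked else notliked ++ [i]) []

-- ===== PORT B =====
def f_alt (likes : List (Int × Int)) (size : Int) : List Int :=
  let liked : List Int :=
    PySem.List.sorted
      (PySem.Set.ofList ((likes.map Prod.snd).filter (fun v => decide (0 ≤ v ∧ v < size))))
      (fun x => x) false
  let r := liked.foldl
    (fun (acc : List Int × Int) v => (acc.1 ++ PySem.List.pyRange acc.2 v 1, v + 1))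
    ([], 0)
  r.1 ++ PySem.List.pyRange r.2 size 1

-- ===== PRECONDITION & SPEC =====
def Spec_f (likes : List (Int × Int)) (size : Int) (out : List Int) : Prop := out = f_alt likes size
instance (likes : List (Int × Int)) (size : Int) (out : List Int) : Decidable (Spec_f likes size out) := by unfold Spec_f; infer_instance

-- ===== CLAIM (what is proved, stated in full; the proofs are below) =====
def Claim_equal_f : Prop := ∀ (likes : List (Int × Int)) (size : Int), Dom_f likes size → Spec_f likes size (f likes size)

-- ===== LEMMAS AND PROOFS =====

theorem scanLikes_eq_any (likes : List (Int × Int)) (i : Int) :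
    scanLikes likes i = likes.any (fun j => j.2 == i) := by
  induction likes with
  | nil => rfl
  | cons j rest ih => simp only [scanLikes, List.any_cons, ih]; cases h : (j.2 == i) <;> simp

theorem foldl_filter (likes : List (Int × Int)) (l : List Int) (acc : List Int) :
    l.foldl (fun notliked i => if scanLikes likes i then notliked else notliked ++ [i]) acc
      = acc ++ l.filter (fun i => !scanLikes likes i) := by
  induction l generalizing acc with
  | nil => simp
  | cons x xs ih =>
      simp only [List.foldl_cons, List.filter_cons, ih]
      by_cases h : scanLikes likes x = true <;> simp [h]

theorem f_eq_filter (likes : List (Int × Int)) (size : Int) :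
    f likes size = (PySem.List.pyRange 0 size 1).filter (fun i => !scanLikes likes i) := by
  simpa using foldl_filter likes (PySem.List.pyRange 0 size 1) []

-- gap-filling over a strictly increasing list L ⊆ [start, size) is the complement filter
theorem gap_fold (L : List Int) (size : Int) :
    L.Pairwise (· < ·) → ∀ (start : Int) (acc : List Int), (∀ v ∈ L, start ≤ v ∧ v < size) →
    (let r := L.foldl
        (fun (a : List Int × Int) v => (a.1 ++ PySem.List.pyRange a.2 v 1, v + 1)) (acc, start)
     r.1 ++ PySem.List.pyRange r.2 size 1)
      = acc ++ (PySem.List.pyRange start size 1).filter (fun i => decide (i ∉ L)) := by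
  induction L with
  | nil => intro _ start acc _; simp
  | cons v rest ih =>
      intro hp start acc hb
      have hpr : rest.Pairwise (· < ·) := hp.of_cons
      have hlt : ∀ w ∈ rest, v < w := by
        intro w hw; exact (List.pairwise_cons.mp hp).1 w hw
      have hv := hb v (List.mem_cons_self)
      have hbr : ∀ w ∈ rest, v + 1 ≤ w ∧ w < size := by
        intro w hw; exact ⟨by have := hlt w hw; omega, (hb w (List.mem_cons_of_mem _ hw)).2⟩
      simp only [List.foldl_cons]
      rw [ih hpr (v + 1) (acc ++ PySem.List.pyRange start v 1) hbr]
      have hsplit : PySem.List.pyRange start size 1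
          = PySem.List.pyRange start v 1 ++ PySem.List.pyRange v size 1 :=
        PySem.List.pyRange_one_append start v size hv.1 (le_of_lt hv.2)
      have hcons : PySem.List.pyRange v size 1 = v :: PySem.List.pyRange (v + 1) size 1 :=
        PySem.List.pyRange_one_cons hv.2
      rw [hsplit, hcons, List.filter_append, List.filter_cons]
      have h1 : (PySem.List.pyRange start v 1).filter (fun i => decide (i ∉ v :: rest))
          = PySem.List.pyRange start v 1 := by
        apply List.filter_eq_self.mpr
        intro i hi
        have hiv : i < v := (PySem.List.mem_pyRange_one.mp hi).2
        simp only [decide_eq_true_eq, List.mem_cons, not_or]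
        exact ⟨by omega, fun hir => by have := hlt i hir; omega⟩
      have h2 : (decide (v ∉ v :: rest)) = false := by simp
      have h3 : (PySem.List.pyRange (v + 1) size 1).filter (fun i => decide (i ∉ v :: rest))
          = (PySem.List.pyRange (v + 1) size 1).filter (fun i => decide (i ∉ rest)) := by
        apply List.filter_congr
        intro i hi
        have : v + 1 ≤ i := (PySem.List.mem_pyRange_one.mp hi).1
        have hne : i ≠ v := by omega
        simp [hne]
      rw [h1, h2, h3]
      simp

theorem f_spec : Claim_equal_f := by
  intro likes size _
  unfold Spec_f
  simp only [f_alt]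
  set L := PySem.List.sorted
      (PySem.Set.ofList ((likes.map Prod.snd).filter (fun v => decide (0 ≤ v ∧ v < size))))
      (fun x => x) false with hL
  have hp : L.Pairwise (· < ·) := PySem.List.sorted_ofList_pairwise_lt _
  have hmemL : ∀ i : Int, i ∈ L ↔ ((0 ≤ i ∧ i < size) ∧ ∃ p ∈ likes, p.2 = i) := by
    intro i
    rw [hL, PySem.List.mem_sorted, PySem.Set.mem_ofList, List.mem_filter, List.mem_map]
    constructor
    · rintro ⟨⟨p, hp', rfl⟩, hr⟩
      exact ⟨of_decide_eq_true hr, p, hp', rfl⟩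
    · rintro ⟨hr, p, hp', rfl⟩
      exact ⟨⟨p, hp', rfl⟩, decide_eq_true hr⟩
  have hb : ∀ v ∈ L, (0 : Int) ≤ v ∧ v < size := by
    intro v hv; exact ((hmemL v).mp hv).1
  rw [f_eq_filter, gap_fold L size hp 0 [] hb]
  simp only [List.nil_append]
  apply List.filter_congr
  intro i hi
  rw [scanLikes_eq_any]
  have hir := PySem.List.mem_pyRange_one.mp hi
  by_cases h : ∃ p ∈ likes, p.2 = i
  · have hin : i ∈ L := (hmemL i).mpr ⟨⟨hir.1, hir.2⟩, h⟩
    have hany : likes.any (fun j => j.2 == i) = true := by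
      obtain ⟨p, hp', he⟩ := h
      exact List.any_eq_true.mpr ⟨p, hp', by simpa using he⟩
    simp [hin, hany]
  · have hnot : i ∉ L := fun hc => h ((hmemL i).mp hc).2
    have hany : likes.any (fun j => j.2 == i) = false := by
      rw [List.any_eq_false]
      intro p hp'
      simp only [beq_iff_eq]
      exact fun he => h ⟨p, hp', he⟩
    simp [hnot, hany]
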